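-- pv_equiv track=rewrite | github.com/rmgil/Stats-APP-V1-ISOLADO | app/stats/postflop_calculator.py | _hero_wins_showdown
-- ===== SOURCE A (Python) =====
-- def _hero_wins_showdown(hand_text: str) -> bool:
--     """Verifica se Hero ganha no showdown"""
--     # Check if Hero wins at showdown specifically
--     if "*** SHOW DOWN ***" in hand_text:
--         lines = hand_text.split('\n')
--         for i, line in enumerate(lines):
--             if "*** SHOW DOWN ***" in line:
--                 # Look for Hero winning after showdown
--                 for j in range(i, min(i+10, len(lines))):
--                     if "Hero collected" in lines[j] or "Hero wins" in lines[j]: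
--                         return True
--     return False
-- ===== SOURCE B (Python) =====
-- def _hero_wins_showdown(hand_text: str) -> bool:
--     """Verifica se Hero ganha no showdown"""
--     # Single pass: a 10-line window counter opened (reset) at each showdown marker.
--     if "*** SHOW DOWN ***" not in hand_text:
--         return False
--     window = 0
--     for line in hand_text.split('\n'):
--         if "*** SHOW DOWN ***" in line:
--             window = 10
--         if window > 0 and ("Hero collected" in line or "Hero wins" in line):
--             return True
--         window -= 1
--     return False
-- ===== Notes on version B (the rewrite author's own statement) =====
-- stated objective: simpler
-- what changed: Replaced the nested loops (for every showdown-marker line, rescan the next 10 lines from a global index) by a single pass over the lines with a 10-line window counter that is reset to 10 at each marker line and decremented per line, keeping A's cheap whole-text substring fast-path.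
import Mathlib
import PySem

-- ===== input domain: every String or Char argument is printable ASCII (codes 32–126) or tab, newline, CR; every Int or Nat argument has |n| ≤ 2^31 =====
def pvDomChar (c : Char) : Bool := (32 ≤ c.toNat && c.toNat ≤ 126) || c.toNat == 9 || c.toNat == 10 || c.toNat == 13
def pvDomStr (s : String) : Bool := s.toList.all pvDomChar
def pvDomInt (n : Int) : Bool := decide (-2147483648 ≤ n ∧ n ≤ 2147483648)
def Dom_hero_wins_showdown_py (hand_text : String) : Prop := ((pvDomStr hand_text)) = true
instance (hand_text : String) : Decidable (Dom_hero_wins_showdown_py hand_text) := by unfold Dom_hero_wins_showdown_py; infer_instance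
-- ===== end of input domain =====

-- B replaces A's nested scan (re-scanning the next 10 lines from every showdown marker)
-- by a single pass over the lines with a 10-line window counter; objective: simpler.

-- ===== PORT A =====
def pvShowdownLine (l : List Char) : Bool := PySem.Chars.isIn "*** SHOW DOWN ***".toList l

def pvHeroWinLine (l : List Char) : Bool :=
  PySem.Chars.isIn "Hero collected".toList l || PySem.Chars.isIn "Hero wins".toList l

-- inner loop of A: for j in range(j, stop): if hero-win in lines[j]: return True
def pvInnerA (lines : List (List Char)) (j stop : Nat) : Bool :=
  if j < stop then (pvHeroWinLine (lines.getD j []) || pvInnerA lines (j + 1) stop)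
  else false
termination_by stop - j

-- outer loop of A: for i, line in enumerate(lines), index carried explicitly
def pvOuterA (lines : List (List Char)) : Nat → List (List Char) → Bool
  | _, [] => false
  | i, line :: rest =>
      if pvShowdownLine line then
        pvInnerA lines i (min (i + 10) lines.length) || pvOuterA lines (i + 1) rest
      else pvOuterA lines (i + 1) rest

def hero_wins_showdown_py (hand_text : String) : Bool :=
  if PySem.Str.isIn "*** SHOW DOWN ***" hand_text then
    let lines := PySem.Chars.splitOn hand_text.toList "\n".toList
    pvOuterA lines 0 lines
  else false

-- ===== PORT B =====
-- single pass with the window counter (window set to 10 on a marker line, tested, then decremented)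
def pvGoB : List (List Char) → Int → Bool
  | [], _ => false
  | line :: rest, window =>
      let window := if pvShowdownLine line then 10 else window
      if window > 0 && pvHeroWinLine line then true
      else pvGoB rest (window - 1)

def hero_wins_showdown_py_alt (hand_text : String) : Bool :=
  if PySem.Str.isIn "*** SHOW DOWN ***" hand_text then
    pvGoB (PySem.Chars.splitOn hand_text.toList "\n".toList) 0
  else false

-- ===== PRECONDITION & SPEC =====
def Spec_hero_wins_showdown_py (hand_text : String) (out : Bool) : Prop := out = hero_wins_showdown_py_alt hand_text
instance (hand_text : String) (out : Bool) : Decidable (Spec_hero_wins_showdown_py hand_text out) := by unfold Spec_hero_wins_showdown_py; infer_instance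

-- ===== CLAIM (what is proved, stated in full; the proofs are below) =====
def Claim_equal_hero_wins_showdown_py : Prop := ∀ (hand_text : String), Dom_hero_wins_showdown_py hand_text → Spec_hero_wins_showdown_py hand_text (hero_wins_showdown_py hand_text)

-- ===== LEMMAS AND PROOFS =====

-- common reference form: at each line, "showdown here and a hero-win within the next 10 lines"
def pvSpec : List (List Char) → Bool
  | [] => false
  | l :: ls => (pvShowdownLine l && (List.take 10 (l :: ls)).any pvHeroWinLine) || pvSpec ls

theorem pvInnerA_eq (lines : List (List Char)) :
    ∀ fuel j stop, stop - j ≤ fuel → stop ≤ lines.length →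
      pvInnerA lines j stop = ((lines.drop j).take (stop - j)).any pvHeroWinLine := by
  intro fuel
  induction fuel with
  | zero =>
      intro j stop hf _
      have h : ¬ j < stop := by omega
      rw [pvInnerA, if_neg h]
      have h0 : stop - j = 0 := by omega
      simp [h0]
  | succ n ih =>
      intro j stop hf hlen
      by_cases h : j < stop
      · rw [pvInnerA, if_pos h]
        have hj : j < lines.length := by omega
        have hdrop : lines.drop j = lines[j] :: lines.drop (j + 1) :=
          List.drop_eq_getElem_cons hj
        have hget : lines.getD j [] = lines[j] := List.getD_eq_getElem _ _ hj
        have hs : stop - j = (stop - (j + 1)) + 1 := by omega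
        rw [ih (j + 1) stop (by omega) hlen, hget, hdrop, hs, List.take_succ_cons,
          List.any_cons]
      · rw [pvInnerA, if_neg h]
        have h0 : stop - j = 0 := by omega
        simp [h0]

theorem pvInnerA_eq_take10 (lines : List (List Char)) (i : Nat) (hi : i ≤ lines.length) :
    pvInnerA lines i (min (i + 10) lines.length) =
      ((lines.drop i).take 10).any pvHeroWinLine := by
  rw [pvInnerA_eq lines (min (i + 10) lines.length - i) i _ le_rfl (by omega)]
  by_cases h : lines.length - i ≤ 10
  · have h1 : min (i + 10) lines.length - i = lines.length - i := by omega
    have hlen : (lines.drop i).length = lines.length - i := by simp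
    rw [h1, List.take_of_length_le (by omega), List.take_of_length_le (by omega)]
  · have h1 : min (i + 10) lines.length - i = 10 := by omega
    rw [h1]

theorem pvOuterA_eq (lines : List (List Char)) :
    ∀ fuel i, lines.length - i ≤ fuel → i ≤ lines.length →
      pvOuterA lines i (lines.drop i) = pvSpec (lines.drop i) := by
  intro fuel
  induction fuel with
  | zero =>
      intro i hf hi
      have h : lines.length ≤ i := by omega
      rw [List.drop_of_length_le h]
      rfl
  | succ n ih =>
      intro i hf hi
      rcases Nat.eq_or_lt_of_le hi with h | h
      · rw [List.drop_of_length_le (by omega)]; rfl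
      · have hdrop : lines.drop i = lines[i] :: lines.drop (i + 1) :=
          List.drop_eq_getElem_cons h
        have key := ih (i + 1) (by omega) (by omega)
        rw [hdrop, pvOuterA, pvSpec, key, ← hdrop, pvInnerA_eq_take10 lines i hi]
        by_cases hs : pvShowdownLine lines[i]
        · rw [if_pos hs, hs, Bool.true_and]
        · rw [if_neg hs, Bool.eq_false_iff.mpr hs, Bool.false_and, Bool.false_or]

theorem pv_any_take_mono (xs : List (List Char)) (n : Nat) (hn : n ≤ 10)
    (h : (xs.take n).any pvHeroWinLine = true) :
    (xs.take 10).any pvHeroWinLine = true := by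
  have hsub : xs.take n = (xs.take 10).take n := by
    rw [List.take_take, Nat.min_eq_left hn]
  rw [List.any_eq_true] at h ⊢
  obtain ⟨x, hx, hw⟩ := h
  exact ⟨x, List.take_subset n _ (hsub ▸ hx), hw⟩

theorem pv_or_absorb (a b c : Bool) (h : a = true → b = true) :
    (b || c) = (a || (b || c)) := by
  cases a
  · rw [Bool.false_or]
  · rw [h rfl, Bool.true_or, Bool.true_or]

theorem pvGoB_eq (lines : List (List Char)) :
    ∀ w : Int, w ≤ 10 →
      pvGoB lines w = ((lines.take w.toNat).any pvHeroWinLine || pvSpec lines) := by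
  induction lines with
  | nil => intro w _; simp [pvGoB, pvSpec]
  | cons l ls ih =>
      intro w hw
      rw [pvGoB]
      set w' : Int := if pvShowdownLine l then 10 else w with hw'
      have hw'le : w' ≤ 10 := by rw [hw']; split_ifs <;> omega
      have hstep :
          (if w' > 0 && pvHeroWinLine l then true else pvGoB ls (w' - 1)) =
            (((l :: ls).take w'.toNat).any pvHeroWinLine || pvSpec ls) := by
        rw [ih (w' - 1) (by omega)]
        by_cases h0 : w' ≤ 0
        · have h1 : w'.toNat = 0 := by omega
          have h2 : (w' - 1).toNat = 0 := by omega
          have h3 : ¬ (w' > 0) := by omega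
          simp [h1, h2, h3]
        · have h1 : w'.toNat = (w' - 1).toNat + 1 := by omega
          have h3 : w' > 0 := by omega
          rw [h1, List.take_succ_cons, List.any_cons]
          simp [h3, Bool.or_assoc]
      rw [hstep, pvSpec]
      by_cases hs : pvShowdownLine l
      · have hw10 : w' = 10 := by rw [hw']; rw [if_pos hs]
        rw [hw10] at *
        rw [hs, Bool.true_and]
        show (((l :: ls).take (10 : Nat)).any pvHeroWinLine || pvSpec ls) = _
        exact pv_or_absorb _ _ _
          (fun h => pv_any_take_mono (l :: ls) w.toNat (by omega) h)
      · have hww : w' = w := by rw [hw']; rw [if_neg hs]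
        rw [hww, Bool.eq_false_iff.mpr hs, Bool.false_and, Bool.false_or]

-- ===== VERDICT (by name: the statement is the Claim_ definition above) =====
theorem hero_wins_showdown_py_spec : Claim_equal_hero_wins_showdown_py := by
  intro hand_text _
  unfold Spec_hero_wins_showdown_py hero_wins_showdown_py hero_wins_showdown_py_alt
  by_cases hg : PySem.Str.isIn "*** SHOW DOWN ***" hand_text
  · rw [if_pos hg, if_pos hg]
    have hA := pvOuterA_eq (PySem.Chars.splitOn hand_text.toList "\n".toList)
      (PySem.Chars.splitOn hand_text.toList "\n".toList).length 0 (by omega) (by omega)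
    have hB := pvGoB_eq (PySem.Chars.splitOn hand_text.toList "\n".toList) 0 (by omega)
    simp only [List.drop_zero] at hA
    simp only [Int.toNat_zero, List.take_zero, List.any_nil, Bool.false_or] at hB
    rw [hA, hB]
  · rw [if_neg hg, if_neg hg]
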